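-- pv_equiv track=rewrite | github.com/NavilanSanthanakrishnan/ClauseDev | clauseainaviprod/scripts/checkpoint_to_clausedev.py | is_excluded
-- ===== SOURCE A (Python) =====
-- import fnmatch
--
-- EXCLUDES = {
--     ".git",
--     "node_modules",
--     "frontend/node_modules",
--     "frontend/dist",
--     "backend/.venv",
--     "__pycache__",
--     "*.pyc",
--     "*.pyo",
--     "*.log",
--     "*.tsbuildinfo",
--     "vite.config.js",
--     "vite.config.d.ts",
-- }
--
-- def is_excluded(relative_path: str) -> bool:
--     normalized = relative_path.strip("/")
--     if not normalized:
--         return False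
--     parts = normalized.split("/")
--     for pattern in EXCLUDES:
--         if "/" in pattern and (normalized == pattern or normalized.startswith(f"{pattern}/")):
--             return True
--         if pattern in parts:
--             return True
--         if fnmatch.fnmatch(normalized, pattern):
--             return True
--         if any(fnmatch.fnmatch(part, pattern) for part in parts):
--             return True
--     return False
-- ===== SOURCE B (Python) =====
-- EXCLUDES = {
--     ".git",
--     "node_modules",
--     "frontend/node_modules",
--     "frontend/dist",
--     "backend/.venv",
--     "__pycache__",
--     "*.pyc",
--     "*.pyo",
--     "*.log",
--     "*.tsbuildinfo",
--     "vite.config.js",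
--     "vite.config.d.ts",
-- }
--
-- # Classify the patterns once: slash-prefix patterns, literal component names, and glob
-- # patterns.  Every glob pattern in EXCLUDES is '*' followed by a literal suffix, and
-- # fnmatch's '*' also crosses '/', so those patterns are exactly suffix tests.
-- _SLASH = sorted(p for p in EXCLUDES if "/" in p)
-- _PLAIN = frozenset(p for p in EXCLUDES if "/" not in p and not any(c in p for c in "*?["))
-- _SUFFIX = sorted(p[1:] for p in EXCLUDES if "/" not in p and any(c in p for c in "*?["))
--
-- def is_excluded(relative_path: str) -> bool:
--     normalized = relative_path.strip("/")
--     if not normalized: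
--         return False
--     parts = normalized.split("/")
--     if any(normalized == p or normalized.startswith(p + "/") for p in _SLASH):
--         return True
--     if any(part in _PLAIN for part in parts):
--         return True
--     return any(normalized.endswith(suf) or any(part.endswith(suf) for part in parts)
--                for suf in _SUFFIX)
-- ===== Notes on version B (the rewrite author's own statement) =====
-- stated objective: simpler
-- what changed: Instead of one loop running four overlapping checks (prefix, component membership and two fnmatch calls) for every pattern, the EXCLUDES set is classified once at module level into slash-prefix patterns, literal component names and star-prefixed glob patterns, and is_excluded makes three separate single-check passes: prefix tests, a frozenset membership over the path components, and plain endswith suffix tests replacing fnmatch.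
import Mathlib
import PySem

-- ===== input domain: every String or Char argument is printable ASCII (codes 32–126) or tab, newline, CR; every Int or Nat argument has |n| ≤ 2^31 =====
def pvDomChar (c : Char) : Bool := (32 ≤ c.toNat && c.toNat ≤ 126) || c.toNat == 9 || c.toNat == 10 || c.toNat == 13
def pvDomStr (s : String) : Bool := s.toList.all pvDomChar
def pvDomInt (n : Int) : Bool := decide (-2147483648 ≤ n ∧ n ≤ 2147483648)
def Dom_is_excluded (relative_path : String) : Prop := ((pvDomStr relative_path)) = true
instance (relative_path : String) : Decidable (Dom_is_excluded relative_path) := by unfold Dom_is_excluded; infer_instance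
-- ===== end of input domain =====

-- B classifies the EXCLUDES patterns once into slash-prefix / plain-name / glob groups (every
-- glob in EXCLUDES is '*' + a literal suffix, so those are suffix tests) and makes three
-- single-check passes instead of A's one loop with four overlapping checks per pattern;
-- objective: simpler (no speed claim).

-- ===== PORT A =====

-- fnmatch.fnmatch(name, pat) on POSIX (normcase = identity), argument order (pat, name).
-- Exact for patterns built from literal characters, '*' and '?' — which covers every pattern
-- in EXCLUDES (none uses '[').
def pvGlob : List Char → List Char → Bool
  | [], s => s.isEmpty
  | '*' :: ps, [] => pvGlob ps []
  | '*' :: ps, c :: t => pvGlob ps (c :: t) || pvGlob ('*' :: ps) t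
  | _ :: _, [] => false
  | p :: ps, c :: s => (p == '?' || p == c) && pvGlob ps s
termination_by p s => (p.length, s.length)

-- the module-level constant EXCLUDES (a Python set; consumed only by an order-independent any)
def pvExcludes : PySem.Set (List Char) := PySem.Set.ofList
  [".git".toList, "node_modules".toList, "frontend/node_modules".toList, "frontend/dist".toList,
   "backend/.venv".toList, "__pycache__".toList, "*.pyc".toList, "*.pyo".toList, "*.log".toList,
   "*.tsbuildinfo".toList, "vite.config.js".toList, "vite.config.d.ts".toList]

def is_excluded (relative_path : String) : Bool :=
  let normalized := PySem.Chars.stripChars relative_path.toList "/".toList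
  if normalized.isEmpty then false
  else
    let parts := PySem.Chars.splitOn normalized "/".toList
    pvExcludes.any (fun pattern =>
      (PySem.Chars.isIn "/".toList pattern &&
        (normalized == pattern || PySem.Chars.startswith normalized (pattern ++ "/".toList))) ||
      parts.contains pattern ||
      pvGlob pattern normalized ||
      parts.any (fun part => pvGlob pattern part))

-- ===== PORT B =====

-- the module-level classified pattern groups of Source B (computed there once at import; literal here)
def pvSlashPats : List (List Char) :=
  ["backend/.venv".toList, "frontend/dist".toList, "frontend/node_modules".toList]
def pvSuffixes : List (List Char) :=
  [".log".toList, ".pyc".toList, ".pyo".toList, ".tsbuildinfo".toList]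
def pvPlainPats : PySem.Set (List Char) := PySem.Set.ofList
  [".git".toList, "node_modules".toList, "__pycache__".toList,
   "vite.config.js".toList, "vite.config.d.ts".toList]

def is_excluded_alt (relative_path : String) : Bool :=
  let normalized := PySem.Chars.stripChars relative_path.toList "/".toList
  if normalized.isEmpty then false
  else
    let parts := PySem.Chars.splitOn normalized "/".toList
    if pvSlashPats.any (fun p =>
        normalized == p || PySem.Chars.startswith normalized (p ++ "/".toList)) then true
    else if parts.any (fun part => pvPlainPats.contains part) then true
    else pvSuffixes.any (fun suf =>
      PySem.Chars.endswith normalized suf || parts.any (fun part => PySem.Chars.endswith part suf))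

-- ===== PRECONDITION & SPEC =====
def Spec_is_excluded (relative_path : String) (out : Bool) : Prop := out = is_excluded_alt relative_path
instance (relative_path : String) (out : Bool) : Decidable (Spec_is_excluded relative_path out) := by unfold Spec_is_excluded; infer_instance

-- ===== CLAIM (what is proved, stated in full; the proofs are below) =====
def Claim_equal_is_excluded : Prop := ∀ (relative_path : String), Dom_is_excluded relative_path → Spec_is_excluded relative_path (is_excluded relative_path)

-- ===== LEMMAS AND PROOFS =====

-- a literal pattern (no '*', no '?') fnmatches exactly itself
theorem pvGlob_literal (p : List Char) (h1 : ('*' : Char) ∉ p) (h2 : ('?' : Char) ∉ p) :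
    ∀ s, pvGlob p s = (s == p) := by
  induction p with
  | nil => intro s; cases s <;> simp [pvGlob]
  | cons c cs ih =>
    have hc1 : c ≠ '*' := fun h => h1 (h ▸ List.mem_cons_self ..)
    have hc2 : c ≠ '?' := fun h => h2 (h ▸ List.mem_cons_self ..)
    have ih' := ih (fun h => h1 (List.mem_cons_of_mem _ h)) (fun h => h2 (List.mem_cons_of_mem _ h))
    intro s
    cases s with
    | nil =>
      rw [pvGlob.eq_def]
      split <;> simp_all
    | cons d t =>
      rw [pvGlob.eq_def]
      split <;>
        first
        | (simp_all; done)
        | (rename_i p' ps' d' t' heq1 heq2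
           injection heq1 with hcp hps
           injection heq2 with hdt hts
           subst hcp; subst hps; subst hdt; subst hts
           have hq : (c == '?') = false := beq_eq_false_iff_ne.mpr hc2
           rw [hq, Bool.false_or, ih' t, Bool.eq_iff_iff]
           simp only [Bool.and_eq_true, beq_iff_eq, List.cons.injEq]
           tauto)

-- a '*'-headed literal pattern fnmatches exactly the strings ending in its suffix
theorem pvGlob_star_literal (p : List Char) (h1 : ('*' : Char) ∉ p) (h2 : ('?' : Char) ∉ p) :
    ∀ s, pvGlob ('*' :: p) s = PySem.Chars.endswith s p := by
  intro s
  induction s with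
  | nil =>
    rw [pvGlob.eq_def]
    rw [show (match ('*' :: p : List Char), ([] : List Char) with
      | [], s => s.isEmpty
      | '*' :: ps, [] => pvGlob ps []
      | '*' :: ps, c :: t => pvGlob ps (c :: t) || pvGlob ('*' :: ps) t
      | _ :: _, [] => false
      | q :: qs, c :: s => (q == '?' || q == c) && pvGlob qs s) = pvGlob p [] from rfl]
    rw [pvGlob_literal p h1 h2, Bool.eq_iff_iff, beq_iff_eq,
        show (PySem.Chars.endswith [] p = true) ↔ p <:+ [] from PySem.Chars.endswith_iff _ _,
        List.suffix_nil]
    exact eq_comm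
  | cons c t ih =>
    rw [pvGlob.eq_def]
    rw [show (match ('*' :: p : List Char), (c :: t : List Char) with
      | [], s => s.isEmpty
      | '*' :: ps, [] => pvGlob ps []
      | '*' :: ps, c :: t => pvGlob ps (c :: t) || pvGlob ('*' :: ps) t
      | _ :: _, [] => false
      | q :: qs, c :: s => (q == '?' || q == c) && pvGlob qs s)
      = (pvGlob p (c :: t) || pvGlob ('*' :: p) t) from rfl]
    rw [pvGlob_literal p h1 h2, ih, Bool.eq_iff_iff]
    simp only [Bool.or_eq_true, beq_iff_eq]
    rw [show (PySem.Chars.endswith t p = true) ↔ p <:+ t from PySem.Chars.endswith_iff _ _,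
        show (PySem.Chars.endswith (c :: t) p = true) ↔ p <:+ c :: t from
          PySem.Chars.endswith_iff _ _, List.suffix_cons_iff]
    tauto

-- the two recursion equations of PySem.Chars.splitOn.go on positive fuel (hold by rfl)
theorem pvGo_succ_nil (sep : List Char) (n : Nat) (cur : List Char) (acc : List (List Char)) :
    PySem.Chars.splitOn.go sep (n+1) [] cur acc = (cur.reverse :: acc).reverse := rfl
theorem pvGo_succ_cons (sep : List Char) (n : Nat) (c : Char) (rest cur : List Char)
    (acc : List (List Char)) :
    PySem.Chars.splitOn.go sep (n+1) (c :: rest) cur acc =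
      if sep.isPrefixOf (c :: rest) then
        PySem.Chars.splitOn.go sep n (List.drop sep.length (c :: rest)) [] (cur.reverse :: acc)
      else PySem.Chars.splitOn.go sep n rest (c :: cur) acc := rfl

-- pieces produced by splitting on "/" never contain '/'
theorem pvSplitGo_no_slash (fuel : Nat) :
    ∀ (l cur : List Char) (acc : List (List Char)),
      l.length < fuel → (∀ x ∈ acc, ('/' : Char) ∉ x) → ('/' : Char) ∉ cur →
      ∀ x ∈ PySem.Chars.splitOn.go "/".toList fuel l cur acc, ('/' : Char) ∉ x := by
  induction fuel with
  | zero => intro l cur acc hf; exact absurd hf (by omega)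
  | succ n ih =>
    intro l cur acc hf hacc hcur
    cases l with
    | nil =>
      rw [pvGo_succ_nil]
      intro x hx
      simp only [List.mem_reverse, List.mem_cons] at hx
      rcases hx with h | h
      · subst h; simpa using hcur
      · exact hacc x h
    | cons c rest =>
      rw [pvGo_succ_cons]
      by_cases hpre : ("/".toList).isPrefixOf (c :: rest) = true
      · rw [if_pos hpre]
        refine ih _ [] _ ?_ ?_ (by simp)
        · have hsl : ("/".toList).length = 1 := rfl
          simp only [List.length_cons] at hf
          simp only [hsl, List.length_drop, List.length_cons]
          omega
        · intro x hx
          rcases List.mem_cons.mp hx with h | h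
          · subst h; simpa using hcur
          · exact hacc x h
      · rw [if_neg hpre]
        have hc : c ≠ '/' := by
          intro h; exact hpre (by simp [h, List.isPrefixOf])
        refine ih rest (c :: cur) acc (by simp only [List.length_cons] at hf; omega) hacc ?_
        intro h
        rcases List.mem_cons.mp h with h | h
        · exact hc h.symm
        · exact hcur h

theorem pvParts_no_slash (n : List Char) :
    ∀ x ∈ PySem.Chars.splitOn n "/".toList, ('/' : Char) ∉ x := by
  rw [PySem.Chars.splitOn]
  exact pvSplitGo_no_slash (n.length + 1) n [] [] (by omega) (by simp) (by simp)

-- A's four checks for a slash-prefix literal pattern reduce to the prefix test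
theorem pvCheck_slash (p n : List Char) (parts : List (List Char))
    (hp : ('/' : Char) ∈ p) (h1 : ('*' : Char) ∉ p) (h2 : ('?' : Char) ∉ p)
    (hparts : ∀ x ∈ parts, ('/' : Char) ∉ x) :
    ((PySem.Chars.isIn "/".toList p &&
        (n == p || PySem.Chars.startswith n (p ++ "/".toList))) ||
      parts.contains p || pvGlob p n || parts.any (fun part => pvGlob p part))
    = (n == p || PySem.Chars.startswith n (p ++ "/".toList)) := by
  have hin : PySem.Chars.isIn "/".toList p = true := by
    rw [PySem.Chars.isIn_iff_infix]
    rcases List.append_of_mem hp with ⟨s, t, rfl⟩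
    exact ⟨s, t, by simp⟩
  rw [hin, Bool.true_and, pvGlob_literal p h1 h2 n, Bool.eq_iff_iff]
  simp only [Bool.or_eq_true, List.any_eq_true, List.contains_eq_mem, decide_eq_true_eq,
    beq_iff_eq]
  constructor
  · rintro ((((hn | hs) | hmem) | hn2) | ⟨x, hx, hgx⟩)
    · exact Or.inl hn
    · exact Or.inr hs
    · exact absurd hp (hparts p hmem)
    · exact Or.inl hn2
    · rw [pvGlob_literal p h1 h2 x, beq_iff_eq] at hgx
      exact absurd hp (hgx ▸ hparts x hx)
  · exact fun h => Or.inl (Or.inl (Or.inl h))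

-- A's four checks for a plain literal name reduce to component membership
theorem pvCheck_plain (p n : List Char)
    (hp : PySem.Chars.isIn "/".toList p = false) (h1 : ('*' : Char) ∉ p) (h2 : ('?' : Char) ∉ p)
    (hself : p ∈ PySem.Chars.splitOn p "/".toList) :
    ((PySem.Chars.isIn "/".toList p &&
        (n == p || PySem.Chars.startswith n (p ++ "/".toList))) ||
      (PySem.Chars.splitOn n "/".toList).contains p || pvGlob p n ||
      (PySem.Chars.splitOn n "/".toList).any (fun part => pvGlob p part))
    = (PySem.Chars.splitOn n "/".toList).contains p := by
  rw [hp, Bool.false_and, Bool.false_or, pvGlob_literal p h1 h2 n, Bool.eq_iff_iff]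
  simp only [Bool.or_eq_true, List.any_eq_true, List.contains_eq_mem, decide_eq_true_eq,
    beq_iff_eq]
  constructor
  · rintro ((hmem | hn) | ⟨x, hx, hgx⟩)
    · exact hmem
    · subst hn; exact hself
    · rw [pvGlob_literal p h1 h2 x, beq_iff_eq] at hgx
      exact hgx ▸ hx
  · exact fun h => Or.inl (Or.inl h)

-- A's four checks for a '*'-headed glob pattern reduce to B's two suffix tests
theorem pvCheck_glob (suf n : List Char) (parts : List (List Char))
    (hg : PySem.Chars.isIn "/".toList ('*' :: suf) = false)
    (h1 : ('*' : Char) ∉ suf) (h2 : ('?' : Char) ∉ suf) :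
    ((PySem.Chars.isIn "/".toList ('*' :: suf) &&
        (n == '*' :: suf || PySem.Chars.startswith n (('*' :: suf) ++ "/".toList))) ||
      parts.contains ('*' :: suf) || pvGlob ('*' :: suf) n ||
      parts.any (fun part => pvGlob ('*' :: suf) part))
    = (PySem.Chars.endswith n suf ||
        parts.any (fun part => PySem.Chars.endswith part suf)) := by
  have he := pvGlob_star_literal suf h1 h2
  rw [hg, Bool.false_and, Bool.false_or, he n]
  simp only [he]
  rw [Bool.eq_iff_iff]
  simp only [Bool.or_eq_true, List.any_eq_true, List.contains_eq_mem, decide_eq_true_eq]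
  constructor
  · rintro ((hmem | hn) | ⟨x, hx, hgx⟩)
    · exact Or.inr ⟨_, hmem, (PySem.Chars.endswith_iff _ _).mpr (List.suffix_cons '*' suf)⟩
    · exact Or.inl hn
    · exact Or.inr ⟨x, hx, hgx⟩
  · rintro (hn | ⟨x, hx, hgx⟩)
    · exact Or.inl (Or.inr hn)
    · exact Or.inr ⟨x, hx, hgx⟩

-- B's plain-name pass over parts equals A's membership tests, pattern by pattern
theorem pvPlain_pass (parts : List (List Char)) :
    parts.any (fun part => pvPlainPats.contains part)
    = (parts.contains ".git".toList || parts.contains "node_modules".toList ||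
       parts.contains "__pycache__".toList || parts.contains "vite.config.js".toList ||
       parts.contains "vite.config.d.ts".toList) := by
  have hP : pvPlainPats = [".git".toList, "node_modules".toList, "__pycache__".toList,
      "vite.config.js".toList, "vite.config.d.ts".toList] := by decide
  rw [Bool.eq_iff_iff, hP]
  simp only [List.any_eq_true, Bool.or_eq_true, List.contains_eq_mem, PySem.Set.contains,
    decide_eq_true_eq, List.mem_cons, List.not_mem_nil, or_false]
  constructor
  · rintro ⟨x, hx, rfl | rfl | rfl | rfl | rfl⟩ <;> tauto
  · rintro ((((h | h) | h) | h) | h) <;> exact ⟨_, h, by tauto⟩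

-- ===== VERDICT (by name: the statement is the Claim_ definition above) =====
set_option maxHeartbeats 1000000 in
theorem is_excluded_spec : Claim_equal_is_excluded := by
  intro relative_path _
  unfold Spec_is_excluded
  simp only [is_excluded, is_excluded_alt]
  set n := PySem.Chars.stripChars relative_path.toList "/".toList with hn
  cases hni : n.isEmpty with
  | true => rfl
  | false =>
    rw [if_neg Bool.false_ne_true, if_neg Bool.false_ne_true]
    have hE : pvExcludes =
        [".git".toList, "node_modules".toList, "frontend/node_modules".toList,
         "frontend/dist".toList, "backend/.venv".toList, "__pycache__".toList,
         '*' :: ".pyc".toList, '*' :: ".pyo".toList, '*' :: ".log".toList,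
         '*' :: ".tsbuildinfo".toList, "vite.config.js".toList,
         "vite.config.d.ts".toList] := by decide
    have hns := pvParts_no_slash n
    have e1 := pvCheck_slash "frontend/node_modules".toList n (PySem.Chars.splitOn n "/".toList) (by decide) (by decide) (by decide) hns
    have e2 := pvCheck_slash "frontend/dist".toList n (PySem.Chars.splitOn n "/".toList) (by decide) (by decide) (by decide) hns
    have e3 := pvCheck_slash "backend/.venv".toList n (PySem.Chars.splitOn n "/".toList) (by decide) (by decide) (by decide) hns
    have p1 := pvCheck_plain ".git".toList n (by decide) (by decide) (by decide) (by decide)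
    have p2 := pvCheck_plain "node_modules".toList n (by decide) (by decide) (by decide) (by decide)
    have p3 := pvCheck_plain "__pycache__".toList n (by decide) (by decide) (by decide) (by decide)
    have p4 := pvCheck_plain "vite.config.js".toList n (by decide) (by decide) (by decide) (by decide)
    have p5 := pvCheck_plain "vite.config.d.ts".toList n (by decide) (by decide) (by decide) (by decide)
    have g1 := pvCheck_glob ".pyc".toList n (PySem.Chars.splitOn n "/".toList) (by decide) (by decide) (by decide)
    have g2 := pvCheck_glob ".pyo".toList n (PySem.Chars.splitOn n "/".toList) (by decide) (by decide) (by decide)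
    have g3 := pvCheck_glob ".log".toList n (PySem.Chars.splitOn n "/".toList) (by decide) (by decide) (by decide)
    have g4 := pvCheck_glob ".tsbuildinfo".toList n (PySem.Chars.splitOn n "/".toList) (by decide) (by decide) (by decide)
    have hB := pvPlain_pass (PySem.Chars.splitOn n "/".toList)
    rw [hE]
    simp only [List.any_cons, List.any_nil, Bool.or_false, pvSlashPats, pvSuffixes]
    rw [e1, e2, e3, p1, p2, p3, p4, p5, g1, g2, g3, g4, hB]
    simp only [Bool.if_true_left]
    generalize (n == "backend/.venv".toList || PySem.Chars.startswith n ("backend/.venv".toList ++ "/".toList)) = s1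
    generalize (n == "frontend/dist".toList || PySem.Chars.startswith n ("frontend/dist".toList ++ "/".toList)) = s2
    generalize (n == "frontend/node_modules".toList || PySem.Chars.startswith n ("frontend/node_modules".toList ++ "/".toList)) = s3
    generalize ((PySem.Chars.splitOn n "/".toList).contains ".git".toList) = c1
    generalize ((PySem.Chars.splitOn n "/".toList).contains "node_modules".toList) = c2
    generalize ((PySem.Chars.splitOn n "/".toList).contains "__pycache__".toList) = c3
    generalize ((PySem.Chars.splitOn n "/".toList).contains "vite.config.js".toList) = c4
    generalize ((PySem.Chars.splitOn n "/".toList).contains "vite.config.d.ts".toList) = c5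
    generalize (PySem.Chars.endswith n ".log".toList || (PySem.Chars.splitOn n "/".toList).any fun part => PySem.Chars.endswith part ".log".toList) = q1
    generalize (PySem.Chars.endswith n ".pyc".toList || (PySem.Chars.splitOn n "/".toList).any fun part => PySem.Chars.endswith part ".pyc".toList) = q2
    generalize (PySem.Chars.endswith n ".pyo".toList || (PySem.Chars.splitOn n "/".toList).any fun part => PySem.Chars.endswith part ".pyo".toList) = q3
    generalize (PySem.Chars.endswith n ".tsbuildinfo".toList || (PySem.Chars.splitOn n "/".toList).any fun part => PySem.Chars.endswith part ".tsbuildinfo".toList) = q4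
    revert s1 s2 s3 c1 c2 c3 c4 c5 q1 q2 q3 q4
    decide
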